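-- pv_equiv track=rewrite | github.com/mazstick/marketlib | marketlib/strategy/MACDdivergence.py | _map_extrema
-- ===== SOURCE A (Python) =====
-- def _map_extrema(
--     price_extrema: list[int], macd_extrema: list[int], max_distance: int = 6
-- ):
--     """
--     Map each price extremum to the nearest MACD extremum within a maximum bar distance.
--
--     Parameters:
--     - price_extrema: indices of price highs (for sell) or lows (for buy)
--     - macd_extrema: indices of MACD highs (for sell) or lows (for buy) on the correct side of zero
--     - max_distance: maximum allowed bar distance between matched extrema
--
--     Returns:
--     - List of (price_index, macd_index) pairs.
--     """
--     mapping = {}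
--     for p_idx in price_extrema:
--         candidates = [m_idx for m_idx in macd_extrema if abs(m_idx - p_idx) <= max_distance]
--         if not candidates:
--             continue
--         # Choose the closest MACD extremum to the price extremum.
--         closest = min(candidates, key=lambda m_idx: abs(m_idx - p_idx))
--         mapping[p_idx] = closest
--     return list(mapping.items())
-- ===== SOURCE B (Python) =====
-- def _bisect_left(a, x, lo, hi):
--     """First index i in [lo, hi) with a[i] >= x (hi if none); a sorted ascending."""
--     if lo >= hi:
--         return lo
--     mid = (lo + hi) // 2
--     if a[mid] < x:
--         return _bisect_left(a, x, mid + 1, hi)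
--     return _bisect_left(a, x, lo, mid)
--
--
-- def _map_extrema(
--     price_extrema: list[int], macd_extrema: list[int], max_distance: int = 6
-- ):
--     # first-occurrence position of each MACD index (also decides ties, as min() does)
--     pos = {}
--     for i, m in enumerate(macd_extrema):
--         if m not in pos:
--             pos[m] = i
--     svals = sorted(set(macd_extrema))  # distinct MACD indices, ascending
--     n = len(svals)
--     mapping = {}
--     for p in price_extrema:
--         i = _bisect_left(svals, p, 0, n)
--         best = None
--         if i > 0 and p - svals[i - 1] <= max_distance:
--             best = svals[i - 1]
--         if i < n and svals[i] - p <= max_distance: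
--             s = svals[i]
--             if best is None or s - p < p - best or (s - p == p - best and pos[s] < pos[best]):
--                 best = s
--         if best is not None:
--             mapping[p] = best
--     return list(mapping.items())
-- ===== Notes on version B (the rewrite author's own statement) =====
-- stated objective: faster
-- what changed: A scans the whole MACD list and calls min() per price extremum (O(P*M)); B precomputes a first-occurrence-position dict and a sorted list of distinct MACD indices, then binary-searches the predecessor/successor of each price extremum and picks the closer one (position dict breaks ties exactly like min()).
import Mathlib
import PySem

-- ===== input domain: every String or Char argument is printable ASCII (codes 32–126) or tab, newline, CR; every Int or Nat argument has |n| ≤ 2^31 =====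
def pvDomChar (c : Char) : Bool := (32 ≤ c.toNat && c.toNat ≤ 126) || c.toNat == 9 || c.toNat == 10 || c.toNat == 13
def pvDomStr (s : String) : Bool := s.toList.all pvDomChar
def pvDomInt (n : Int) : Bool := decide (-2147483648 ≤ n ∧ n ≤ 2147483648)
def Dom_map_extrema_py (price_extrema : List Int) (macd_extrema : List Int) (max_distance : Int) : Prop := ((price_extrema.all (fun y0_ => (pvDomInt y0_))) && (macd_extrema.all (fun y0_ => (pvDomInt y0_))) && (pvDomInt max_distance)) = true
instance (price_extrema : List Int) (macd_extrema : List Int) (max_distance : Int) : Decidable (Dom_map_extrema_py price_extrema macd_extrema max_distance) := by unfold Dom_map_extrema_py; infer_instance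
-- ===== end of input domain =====

-- B replaces A's per-price scan of all MACD extrema by a sorted distinct-value list with binary search
-- (nearest = predecessor/successor) plus a first-position dict for ties; same results.


-- ===== PORT A =====
def map_extrema_py (price_extrema : List Int) (macd_extrema : List Int) (max_distance : Int) : List (Int × Int) :=
  (price_extrema.foldl (fun mapping p_idx =>
      let candidates := macd_extrema.filter (fun m_idx => decide (|m_idx - p_idx| ≤ max_distance))
      -- 'if not candidates: continue' + 'min(candidates, key=…)': min? is none exactly on []
      match PySem.List.min? candidates (fun m_idx => |m_idx - p_idx|) with
      | none => mapping
      | some closest => mapping.insert p_idx closest)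
    PySem.Dict.empty).items

-- ===== PORT B =====
-- helper _bisect_left(a, x, lo, hi): first index i in [lo, hi) with a[i] >= x (hi if none)
def pvBisectLeft (a : List Int) (x : Int) (lo hi : Int) : Int :=
  if lo ≥ hi then lo
  else
    let mid := PySem.Int.floordiv (lo + hi) 2
    match PySem.List.pyGet? a mid with
    | none => lo        -- unreachable under the caller's bounds (Python a[mid] would raise)
    | some v =>
      if v < x then pvBisectLeft a x (mid + 1) hi
      else pvBisectLeft a x lo mid
  termination_by (hi - lo).toNat
  decreasing_by
  · have h1 := (PySem.Int.floordiv_two_mid_bounds (by omega : lo ≤ hi)).1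
    omega
  · have h2 : PySem.Int.floordiv (lo + hi) 2 < hi := by
      rw [PySem.Int.floordiv_lt_iff_lt_mul (by omega)]; omega
    omega

-- the body of B's loop: best-matching MACD index for price index p (None if no candidate)
def pvBest (pos : PySem.Dict Int Int) (svals : List Int) (n : Int) (max_distance : Int) (p : Int) : Option Int :=
  let i := pvBisectLeft svals p 0 n
  let best0 : Option Int :=
    if i > 0 then
      match PySem.List.pyGet? svals (i - 1) with
      | none => none  -- unreachable (Python would raise IndexError)
      | some v => if p - v ≤ max_distance then some v else none
    else none
  if i < n then
    match PySem.List.pyGet? svals i with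
    | none => best0  -- unreachable
    | some s =>
      if s - p ≤ max_distance then
        match best0 with
        | none => some s
        | some b =>
          if s - p < p - b ∨ (s - p = p - b ∧ pos.getD s 0 < pos.getD b 0) then some s else best0
      else best0
  else best0

def map_extrema_py_alt (price_extrema : List Int) (macd_extrema : List Int) (max_distance : Int) : List (Int × Int) :=
  let pos : PySem.Dict Int Int :=
    (PySem.List.enumerate macd_extrema).foldl
      (fun pos im => if pos.contains im.2 then pos else pos.insert im.2 im.1) PySem.Dict.empty
  let svals := PySem.List.sorted (PySem.Set.ofList macd_extrema) (fun x => x)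
  let n : Int := svals.length
  (price_extrema.foldl (fun mapping p =>
      match pvBest pos svals n max_distance p with
      | none => mapping
      | some b => mapping.insert p b)
    PySem.Dict.empty).items

-- ===== PRECONDITION & SPEC =====
def Spec_map_extrema_py (price_extrema : List Int) (macd_extrema : List Int) (max_distance : Int) (out : List (Int × Int)) : Prop := out = map_extrema_py_alt price_extrema macd_extrema max_distance
instance (price_extrema : List Int) (macd_extrema : List Int) (max_distance : Int) (out : List (Int × Int)) : Decidable (Spec_map_extrema_py price_extrema macd_extrema max_distance out) := by unfold Spec_map_extrema_py; infer_instance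

-- ===== CLAIM (what is proved, stated in full; the proofs are below) =====
def Claim_equal_map_extrema_py : Prop := ∀ (price_extrema : List Int) (macd_extrema : List Int) (max_distance : Int), Dom_map_extrema_py price_extrema macd_extrema max_distance → Spec_map_extrema_py price_extrema macd_extrema max_distance (map_extrema_py price_extrema macd_extrema max_distance)

-- ===== LEMMAS AND PROOFS =====

-- Python's min(…, key=f) as a named fold step
def pvMinStep (f : Int → Int) (acc : Option Int) (x : Int) : Option Int :=
  match acc with
  | none => some x
  | some m => if f x < f m then some x else some m

theorem pv_min?_eq_foldl (f : Int → Int) (cs : List Int) :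
    PySem.List.min? cs f = cs.foldl (pvMinStep f) none := by
  unfold PySem.List.min?
  exact List.foldl_ext _ _ _ (fun acc x _ => by cases acc <;> rfl)

theorem pv_foldl_min_stay (f : Int → Int) (t : List Int) (m : Int)
    (h : ∀ x ∈ t, ¬ f x < f m) :
    t.foldl (pvMinStep f) (some m) = some m := by
  induction t with
  | nil => rfl
  | cons c t ih =>
    simp only [List.foldl_cons, pvMinStep]
    rw [if_neg (h c (by simp))]
    exact ih (fun x hx => h x (by simp [hx]))

theorem pv_foldl_min_find (f : Int → Int) (v : Int) (t : List Int) (m : Int)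
    (hlb : ∀ x ∈ t, v ≤ f x) (hm : v < f m) (hex : ∃ x ∈ t, f x = v) :
    t.foldl (pvMinStep f) (some m) = t.find? (fun x => decide (f x = v)) := by
  induction t generalizing m with
  | nil => simp at hex
  | cons c t ih =>
    simp only [List.foldl_cons, List.find?_cons, pvMinStep]
    by_cases hc : f c = v
    · simp only [hc, decide_true]
      rw [if_pos (by omega)]
      exact pv_foldl_min_stay f t c (fun x hx => by have := hlb x (by simp [hx]); omega)
    · have hvc : v < f c := lt_of_le_of_ne (hlb c (by simp)) (Ne.symm hc)
      simp only [hc, decide_false]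
      have hex' : ∃ x ∈ t, f x = v := by
        obtain ⟨x, hx, hfx⟩ := hex
        rcases List.mem_cons.mp hx with rfl | hxt
        · exact absurd hfx hc
        · exact ⟨x, hxt, hfx⟩
      split_ifs with h
      · exact ih c (fun x hx => hlb x (by simp [hx])) hvc hex'
      · exact ih m (fun x hx => hlb x (by simp [hx])) hm hex'

-- min(cs, key=f) is the FIRST element attaining the minimum key value v
theorem pv_min?_eq_find (f : Int → Int) (v : Int) (cs : List Int)
    (hlb : ∀ x ∈ cs, v ≤ f x) (hex : ∃ x ∈ cs, f x = v) :
    PySem.List.min? cs f = cs.find? (fun x => decide (f x = v)) := by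
  rw [pv_min?_eq_foldl]
  cases cs with
  | nil => simp at hex
  | cons c t =>
    simp only [List.foldl_cons, List.find?_cons, pvMinStep]
    by_cases hc : f c = v
    · simp only [hc, decide_true]
      exact pv_foldl_min_stay f t c (fun x hx => by have := hlb x (by simp [hx]); omega)
    · have hvc : v < f c := lt_of_le_of_ne (hlb c (by simp)) (Ne.symm hc)
      simp only [hc, decide_false]
      have hex' : ∃ x ∈ t, f x = v := by
        obtain ⟨x, hx, hfx⟩ := hex
        rcases List.mem_cons.mp hx with rfl | hxt
        · exact absurd hfx hc
        · exact ⟨x, hxt, hfx⟩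
      exact pv_foldl_min_find f v t c (fun x hx => hlb x (by simp [hx])) hvc hex'

theorem pv_find?_filter (ms : List Int) (q pf : Int → Bool)
    (h : ∀ x, q x = true → pf x = true) :
    (ms.filter pf).find? q = ms.find? q := by
  induction ms with
  | nil => rfl
  | cons m t ih =>
    by_cases hp : pf m = true
    · simp only [List.filter_cons, hp, if_true, List.find?_cons]
      cases hq : q m <;> simp [ih]
    · have hq : q m = false := by
        cases hq : q m
        · rfl
        · exact absurd (h m hq) hp
      simp [hp, hq, ih]

theorem pv_find_one (ms : List Int) (a : Int) (h : a ∈ ms) :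
    ms.find? (fun x => decide (x = a)) = some a := by
  induction ms with
  | nil => simp at h
  | cons m t ih =>
    rw [List.find?_cons]
    by_cases hm : m = a
    · simp [hm]
    · simp only [hm, decide_false]
      exact ih (by rcases List.mem_cons.mp h with rfl | ht; exacts [absurd rfl hm, ht])

theorem pv_find_left (ms : List Int) (lo hi : Int) (hlo : lo ∈ ms) (hhi : hi ∉ ms) :
    ms.find? (fun x => decide (x = lo ∨ x = hi)) = some lo := by
  induction ms with
  | nil => simp at hlo
  | cons m t ih =>
    rw [List.find?_cons]
    by_cases hm : m = lo
    · simp [hm]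
    · have hmhi : m ≠ hi := fun h => hhi (h ▸ List.mem_cons_self ..)
      simp only [hm, hmhi, or_self, decide_false]
      exact ih (by rcases List.mem_cons.mp hlo with rfl | ht; exacts [absurd rfl hm, ht])
        (fun h => hhi (List.mem_cons_of_mem _ h))

theorem pv_find_right (ms : List Int) (lo hi : Int) (hlo : lo ∉ ms) (hhi : hi ∈ ms) :
    ms.find? (fun x => decide (x = lo ∨ x = hi)) = some hi := by
  induction ms with
  | nil => simp at hhi
  | cons m t ih =>
    rw [List.find?_cons]
    by_cases hm : m = hi
    · simp [hm]
    · have hmlo : m ≠ lo := fun h => hlo (h ▸ List.mem_cons_self ..)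
      simp only [hm, hmlo, or_self, decide_false]
      exact ih (fun h => hlo (List.mem_cons_of_mem _ h))
        (by rcases List.mem_cons.mp hhi with rfl | ht; exacts [absurd rfl hm, ht])

theorem pv_find_two (ms : List Int) (lo hi : Int) (hne : lo ≠ hi)
    (hlo : lo ∈ ms) (hhi : hi ∈ ms) :
    ms.find? (fun x => decide (x = lo ∨ x = hi))
      = some (if ms.idxOf lo < ms.idxOf hi then lo else hi) := by
  induction ms with
  | nil => simp at hlo
  | cons m t ih =>
    rw [List.find?_cons]
    by_cases hm : m = lo
    · subst hm
      have h2 : m ≠ hi := hne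
      simp [h2]
    · by_cases hm2 : m = hi
      · subst hm2
        simp [hm]
      · simp only [hm, hm2, or_self, decide_false]
        have hlo' : lo ∈ t := by rcases List.mem_cons.mp hlo with rfl | h; exacts [absurd rfl hm, h]
        have hhi' : hi ∈ t := by rcases List.mem_cons.mp hhi with rfl | h; exacts [absurd rfl hm2, h]
        rw [ih hlo' hhi']
        have e1 : (m :: t).idxOf lo = t.idxOf lo + 1 := by simp [hm]
        have e2 : (m :: t).idxOf hi = t.idxOf hi + 1 := by simp [hm2]
        rw [e1, e2]
        by_cases h : t.idxOf lo < t.idxOf hi <;> simp [h] <;> omega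

theorem pv_contains_iff (d : PySem.Dict Int Int) (k : Int) :
    d.contains k = true ↔ (d.get? k).isSome := by
  simp [PySem.Dict.contains, PySem.Dict.get?, List.any_eq_true, List.find?_isSome]

theorem pv_pos_fold (ms : List Int) (s : Int) (d : PySem.Dict Int Int) (v : Int) :
    ((PySem.List.enumerate ms s).foldl
      (fun pos im => if pos.contains im.2 then pos else pos.insert im.2 im.1) d).get? v
      = match d.get? v with
        | some w => some w
        | none => (List.idxOf? v ms).map (fun n => (s + n : Int)) := by
  induction ms generalizing s d with
  | nil =>
    simp only [PySem.List.enumerate, List.foldl_nil]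
    cases h : d.get? v <;> simp [h, List.idxOf?]
  | cons m t ih =>
    simp only [PySem.List.enumerate, List.foldl_cons]
    by_cases hc : d.contains m = true
    · rw [if_pos hc, ih]
      by_cases hv : v = m
      · subst hv
        obtain ⟨w, hw⟩ := Option.isSome_iff_exists.mp ((pv_contains_iff d v).mp hc)
        simp [hw]
      · cases h : d.get? v <;> simp [List.idxOf?_cons, Ne.symm hv]
        · cases hn : List.idxOf? v t
          · rfl
          · simp only [Option.map_some, Option.bind_some]
            congr 1
            push_cast
            ring
    · rw [if_neg hc, ih]
      by_cases hv : v = m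
      · subst hv
        have hd : d.get? v = none := by
          cases h : d.get? v with
          | none => rfl
          | some w => exact absurd ((pv_contains_iff d v).mpr (by simp [h])) hc
        rw [PySem.Dict.get?_insert_self]
        simp [hd, List.idxOf?_cons]
      · rw [PySem.Dict.get?_insert_of_ne _ _ hv]
        cases h : d.get? v <;> simp [List.idxOf?_cons, Ne.symm hv]
        · cases hn : List.idxOf? v t
          · rfl
          · simp only [Option.map_some, Option.bind_some]
            congr 1
            push_cast
            ring

theorem pv_idxOf?_mem (v : Int) (ms : List Int) (h : v ∈ ms) :
    List.idxOf? v ms = some (ms.idxOf v) := by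
  induction ms with
  | nil => simp at h
  | cons m t ih =>
    rw [List.idxOf?_cons, List.idxOf_cons]
    by_cases hm : m = v
    · simp [hm]
    · have hvt : v ∈ t := by rcases List.mem_cons.mp h with rfl | ht; exacts [absurd rfl hm, ht]
      have hb : (m == v) = false := by simp [hm]
      simp [hb, ih hvt]

theorem pv_getD_mono (a : List Int) (hs : a.Pairwise (· ≤ ·)) (i j : Nat)
    (hij : i ≤ j) (hj : j < a.length) : a.getD i 0 ≤ a.getD j 0 := by
  rcases Nat.lt_or_ge i j with h | h
  · have := List.pairwise_iff_getElem.mp hs i j (by omega) hj h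
    rwa [List.getD_eq_getElem?_getD, List.getD_eq_getElem?_getD,
      List.getElem?_eq_getElem (by omega), List.getElem?_eq_getElem hj]
  · have : i = j := by omega
    subst this; rfl

theorem pv_pyGet_nonneg (a : List Int) (i : Int) (h0 : 0 ≤ i) (h : i < a.length) :
    PySem.List.pyGet? a i = some (a.getD i.toNat 0) := by
  rw [show i = ((i.toNat : Nat) : Int) by omega, PySem.List.pyGet?_natCast]
  rw [List.getElem?_eq_getElem (by omega)]
  rw [List.getD_eq_getElem?_getD, List.getElem?_eq_getElem (by omega)]
  rfl

theorem pv_bisect_spec (a : List Int) (x : Int) (hs : a.Pairwise (· ≤ ·)) :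
    ∀ (k : Nat) (lo hi : Int), (hi - lo).toNat = k → 0 ≤ lo → lo ≤ hi → hi ≤ a.length →
    lo ≤ pvBisectLeft a x lo hi ∧ pvBisectLeft a x lo hi ≤ hi ∧
      (∀ j : Nat, lo ≤ (j : Int) → (j : Int) < pvBisectLeft a x lo hi → a.getD j 0 < x) ∧
      (∀ j : Nat, pvBisectLeft a x lo hi ≤ (j : Int) → (j : Int) < hi → x ≤ a.getD j 0) := by
  intro k
  induction k using Nat.strong_induction_on with
  | _ k IH =>
    intro lo hi hk h0 h1 h2
    rw [pvBisectLeft]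
    by_cases hlh : lo ≥ hi
    · rw [if_pos hlh]
      refine ⟨le_refl _, by omega, ?_, ?_⟩ <;> intro j hj1 hj2 <;> omega
    · rw [if_neg hlh]
      have hmid1 : lo ≤ PySem.Int.floordiv (lo + hi) 2 :=
        (PySem.Int.floordiv_two_mid_bounds (by omega : lo ≤ hi)).1
      have hmid2 : PySem.Int.floordiv (lo + hi) 2 < hi := by
        rw [PySem.Int.floordiv_lt_iff_lt_mul (by omega)]; omega
      set mid := PySem.Int.floordiv (lo + hi) 2 with hmdef
      have hget : PySem.List.pyGet? a mid = some (a.getD mid.toNat 0) :=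
        pv_pyGet_nonneg a mid (by omega) (by omega)
      simp only [hget]
      by_cases hv : a.getD mid.toNat 0 < x
      · rw [if_pos hv]
        obtain ⟨r1, r2, r3, r4⟩ := IH (hi - (mid + 1)).toNat (by omega) (mid + 1) hi rfl (by omega) (by omega) h2
        refine ⟨by omega, r2, ?_, r4⟩
        intro j hj1 hj2
        by_cases hjm : (j : Int) ≤ mid
        · calc a.getD j 0 ≤ a.getD mid.toNat 0 :=
                pv_getD_mono a hs j mid.toNat (by omega) (by omega)
            _ < x := hv
        · exact r3 j (by omega) hj2
      · rw [if_neg hv]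
        obtain ⟨r1, r2, r3, r4⟩ := IH (mid - lo).toNat (by omega) lo mid rfl h0 (by omega) (by omega)
        refine ⟨r1, by omega, r3, ?_⟩
        intro j hj1 hj2
        by_cases hjm : mid ≤ (j : Int)
        · calc x ≤ a.getD mid.toNat 0 := by omega
            _ ≤ a.getD j 0 := pv_getD_mono a hs mid.toNat j (by omega) (by omega)
        · exact r4 j hj1 (by omega)

theorem pv_abs_lt {a b : Int} (h : a < b) : |a - b| = b - a := by
  rw [abs_of_neg (by omega : a - b < 0)]; ring

theorem pv_abs_ge {a b : Int} (h : b ≤ a) : |a - b| = a - b := abs_of_nonneg (by omega)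

theorem pv_find_eqq (ms : List Int) (lo hi : Int) (heq : lo = hi) (h : lo ∈ ms) :
    ms.find? (fun x => decide (x = lo ∨ x = hi)) = some lo := by
  subst heq
  rw [show (fun x : Int => decide (x = lo ∨ x = lo)) = (fun x => decide (x = lo)) from
    funext fun x => by rw [decide_eq_decide]; tauto]
  exact pv_find_one ms lo h

-- A's value, characterised: if v is the least distance among candidates and b the first
-- element of ms at distance v, then min-over-filter returns b
theorem pv_min_filter_eq (ms : List Int) (D p v b : Int)
    (hv0 : 0 ≤ v) (hvD : v ≤ D)
    (hlb : ∀ x ∈ ms, |x - p| ≤ D → v ≤ |x - p|)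
    (hfind : ms.find? (fun x => decide (x = p - v ∨ x = p + v)) = some b)
    (hbmem : b ∈ ms) (hbv : |b - p| = v) :
    PySem.List.min? (ms.filter (fun m => decide (|m - p| ≤ D))) (fun m => |m - p|) = some b := by
  rw [pv_min?_eq_find (fun m => |m - p|) v _
      (by
        intro x hx
        obtain ⟨hxm, hxd⟩ := List.mem_filter.mp hx
        exact hlb x hxm (by simpa using hxd))
      ⟨b, List.mem_filter.mpr ⟨hbmem, by simp [hbv, hvD]⟩, hbv⟩]
  rw [pv_find?_filter ms _ _
      (fun x hx => by
        simp only [decide_eq_true_eq] at hx ⊢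
        omega)]
  rw [show (fun x : Int => decide (|x - p| = v)) = (fun x => decide (x = p - v ∨ x = p + v)) from
    funext fun x => by rw [decide_eq_decide, abs_eq hv0]; omega]
  exact hfind

-- central lemma: B's candidate choice equals A's min-over-filter, for every price index p
theorem pv_central (ms : List Int) (D p : Int) :
    PySem.List.min? (ms.filter (fun m => decide (|m - p| ≤ D))) (fun m => |m - p|)
      = pvBest
          ((PySem.List.enumerate ms).foldl
            (fun pos im => if pos.contains im.2 then pos else pos.insert im.2 im.1)
            PySem.Dict.empty)
          (PySem.List.sorted (PySem.Set.ofList ms) (fun x => x))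
          ((PySem.List.sorted (PySem.Set.ofList ms) (fun x => x)).length : Int)
          D p := by
  set sv := PySem.List.sorted (PySem.Set.ofList ms) (fun x => x) with hsvdef
  set pos := (PySem.List.enumerate ms).foldl
      (fun pos im => if pos.contains im.2 then pos else pos.insert im.2 im.1)
      (PySem.Dict.empty : PySem.Dict Int Int) with hposdef
  have hpw : sv.Pairwise (· < ·) := by
    rw [hsvdef]; exact PySem.List.sorted_ofList_pairwise_lt ms
  have hple : sv.Pairwise (· ≤ ·) := hpw.imp le_of_lt
  have hmem : ∀ x : Int, x ∈ sv ↔ x ∈ ms := fun x => by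
    rw [hsvdef, PySem.List.mem_sorted, PySem.Set.mem_ofList]
  have hmemD : ∀ j : Nat, j < sv.length → sv.getD j 0 ∈ ms := by
    intro j hj
    rw [List.getD_eq_getElem?_getD, List.getElem?_eq_getElem hj]
    exact (hmem _).mp (List.getElem_mem hj)
  have hidxD : ∀ m, m ∈ ms → ∃ j : Nat, j < sv.length ∧ sv.getD j 0 = m := by
    intro m hm
    obtain ⟨j, hj, hje⟩ := List.mem_iff_getElem.mp ((hmem m).mpr hm)
    exact ⟨j, hj, by rw [List.getD_eq_getElem?_getD, List.getElem?_eq_getElem hj]; exact hje⟩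
  have hposD : ∀ v ∈ ms, PySem.Dict.getD pos v 0 = (ms.idxOf v : Int) := by
    intro v hv
    have h1 : pos.get? v = some ((ms.idxOf v : Int)) := by
      rw [hposdef, pv_pos_fold]
      simp [pv_idxOf?_mem v ms hv]
    simp [PySem.Dict.getD, h1]
  obtain ⟨hr0, hrn, hlt, hge⟩ :=
    pv_bisect_spec sv p hple ((sv.length : Int) - 0).toNat 0 (sv.length : Int) rfl
      (le_refl 0) (by omega) (le_refl _)
  simp only [pvBest]
  set r := pvBisectLeft sv p 0 (sv.length : Int) with hrdef
  have F1 : ∀ m ∈ ms, m < p → 0 < r ∧ m ≤ sv.getD (r - 1).toNat 0 := by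
    intro m hm hmp
    obtain ⟨j, hj, hje⟩ := hidxD m hm
    have hjr : (j : Int) < r := by
      by_contra hh
      have := hge j (by omega) (by exact_mod_cast hj)
      omega
    refine ⟨by omega, ?_⟩
    calc m = sv.getD j 0 := hje.symm
      _ ≤ sv.getD (r - 1).toNat 0 := pv_getD_mono sv hple j (r - 1).toNat (by omega) (by omega)
  have F2 : ∀ m ∈ ms, p ≤ m → r < (sv.length : Int) ∧ sv.getD r.toNat 0 ≤ m := by
    intro m hm hpm
    obtain ⟨j, hj, hje⟩ := hidxD m hm
    have hjr : r ≤ (j : Int) := by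
      by_contra hh
      have := hlt j (by omega) (by omega)
      omega
    refine ⟨by omega, ?_⟩
    calc sv.getD r.toNat 0 ≤ sv.getD j 0 := pv_getD_mono sv hple r.toNat j (by omega) hj
      _ = m := hje
  have F3 : 0 < r → sv.getD (r - 1).toNat 0 ∈ ms ∧ sv.getD (r - 1).toNat 0 < p := fun h =>
    ⟨hmemD _ (by omega), hlt (r - 1).toNat (by omega) (by omega)⟩
  have F4 : r < (sv.length : Int) → sv.getD r.toNat 0 ∈ ms ∧ p ≤ sv.getD r.toNat 0 := fun h =>
    ⟨hmemD _ (by omega), hge r.toNat (by omega) (by omega)⟩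
  by_cases hr : r > 0
  · have hgp : PySem.List.pyGet? sv (r - 1) = some (sv.getD (r - 1).toNat 0) :=
      pv_pyGet_nonneg sv (r - 1) (by omega) (by omega)
    obtain ⟨hPmem, hPlt⟩ := F3 hr
    set P := sv.getD (r - 1).toNat 0 with hPdef
    by_cases hdP : p - P ≤ D
    · -- best0 = some P
      simp only [if_pos hr, hgp, if_pos hdP]
      by_cases hrn2 : r < (sv.length : Int)
      · have hgs : PySem.List.pyGet? sv r = some (sv.getD r.toNat 0) :=
          pv_pyGet_nonneg sv r (by omega) (by omega)
        obtain ⟨hSmem, hSge⟩ := F4 hrn2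
        set S := sv.getD r.toNat 0 with hSdef
        simp only [if_pos hrn2, hgs]
        by_cases hdS : S - p ≤ D
        · simp only [if_pos hdS]
          rcases lt_trichotomy (S - p) (p - P) with hc | hc | hc
          · -- succ strictly closer
            rw [if_pos (Or.inl hc)]
            refine pv_min_filter_eq ms D p (S - p) S (by omega) (by omega) ?_ ?_ hSmem (pv_abs_ge hSge)
            · intro x hx hxD
              rcases lt_or_ge x p with hxp | hxp
              · have h1 := (F1 x hx hxp).2
                rw [pv_abs_lt hxp] at hxD ⊢
                omega
              · have h2 := (F2 x hx hxp).2
                rw [pv_abs_ge hxp] at hxD ⊢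
                omega
            · by_cases hv0 : S - p = 0
              · rw [pv_find_eqq ms _ _ (by omega) (by rw [show p - (S - p) = S by omega]; exact hSmem)]
                congr 1; omega
              · have hlonot : p - (S - p) ∉ ms := by
                  intro hmem2
                  have h1 := (F1 _ hmem2 (by omega)).2
                  omega
                rw [pv_find_right ms _ _ hlonot (by rw [show p + (S - p) = S by omega]; exact hSmem)]
                congr 1; omega
          · -- tie: decided by first position in ms
            have hPneS : P ≠ S := by omega
            have hidxne : ms.idxOf P ≠ ms.idxOf S := fun h =>
              hPneS ((List.idxOf_inj hPmem).mp h)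
            have hv0 : 0 < p - P := by omega
            have heq : PySem.List.min? (ms.filter (fun m => decide (|m - p| ≤ D)))
                (fun m => |m - p|) = some (if ms.idxOf P < ms.idxOf S then P else S) := by
              refine pv_min_filter_eq ms D p (p - P) _ (by omega) (by omega) ?_ ?_ ?_ ?_
              · intro x hx hxD
                rcases lt_or_ge x p with hxp | hxp
                · have h1 := (F1 x hx hxp).2
                  rw [pv_abs_lt hxp] at hxD ⊢
                  omega
                · have h2 := (F2 x hx hxp).2
                  rw [pv_abs_ge hxp] at hxD ⊢
                  omega
              · rw [show p - (p - P) = P by omega, show p + (p - P) = S by omega]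
                exact pv_find_two ms P S hPneS hPmem hSmem
              · split <;> [exact hPmem; exact hSmem]
              · split <;> [skip; skip]
                · rw [pv_abs_lt hPlt]
                · rw [pv_abs_ge hSge]; omega
            rw [heq, hposD S hSmem, hposD P hPmem]
            rcases Nat.lt_or_ge (ms.idxOf P) (ms.idxOf S) with hio | hio
            · rw [if_pos hio, if_neg]
              intro hcond
              rcases hcond with h1 | ⟨_, h2⟩
              · omega
              · have : ms.idxOf S < ms.idxOf P := by exact_mod_cast h2
                omega
            · have hio2 : ms.idxOf S < ms.idxOf P := by omega
              rw [if_neg (by omega), if_pos (Or.inr ⟨hc.symm ▸ rfl, by exact_mod_cast hio2⟩)]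
          · -- pred strictly closer
            rw [if_neg (by omega : ¬(S - p < p - P ∨ (S - p = p - P ∧
                PySem.Dict.getD pos S 0 < PySem.Dict.getD pos P 0)))]
            refine pv_min_filter_eq ms D p (p - P) P (by omega) (by omega) ?_ ?_ hPmem (pv_abs_lt hPlt)
            · intro x hx hxD
              rcases lt_or_ge x p with hxp | hxp
              · have h1 := (F1 x hx hxp).2
                rw [pv_abs_lt hxp] at hxD ⊢
                omega
              · have h2 := (F2 x hx hxp).2
                rw [pv_abs_ge hxp] at hxD ⊢
                omega
            · have hhinot : p + (p - P) ∉ ms := by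
                intro hmem2
                have h1 := (F2 _ hmem2 (by omega)).2
                omega
              rw [pv_find_left ms _ _ (by rw [show p - (p - P) = P by omega]; exact hPmem) hhinot]
              congr 1; omega
        · -- succ out of range: best = pred
          simp only [if_neg hdS]
          refine pv_min_filter_eq ms D p (p - P) P (by omega) (by omega) ?_ ?_ hPmem (pv_abs_lt hPlt)
          · intro x hx hxD
            rcases lt_or_ge x p with hxp | hxp
            · have h1 := (F1 x hx hxp).2
              rw [pv_abs_lt hxp] at hxD ⊢
              omega
            · have h2 := (F2 x hx hxp).2
              rw [pv_abs_ge hxp] at hxD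
              omega
          · have hhinot : p + (p - P) ∉ ms := by
              intro hmem2
              have h1 := (F2 _ hmem2 (by omega)).2
              omega
            rw [pv_find_left ms _ _ (by rw [show p - (p - P) = P by omega]; exact hPmem) hhinot]
            congr 1; omega
      · -- no successor at all: best = pred
        simp only [if_neg hrn2]
        refine pv_min_filter_eq ms D p (p - P) P (by omega) (by omega) ?_ ?_ hPmem (pv_abs_lt hPlt)
        · intro x hx hxD
          rcases lt_or_ge x p with hxp | hxp
          · have h1 := (F1 x hx hxp).2
            rw [pv_abs_lt hxp] at hxD ⊢
            omega
          · have h2 := (F2 x hx hxp).1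
            omega
        · have hhinot : p + (p - P) ∉ ms := by
            intro hmem2
            have h1 := (F2 _ hmem2 (by omega)).1
            omega
          rw [pv_find_left ms _ _ (by rw [show p - (p - P) = P by omega]; exact hPmem) hhinot]
          congr 1; omega
    · -- pred out of range: best0 = none
      simp only [if_pos hr, hgp, if_neg hdP]
      by_cases hrn2 : r < (sv.length : Int)
      · have hgs : PySem.List.pyGet? sv r = some (sv.getD r.toNat 0) :=
          pv_pyGet_nonneg sv r (by omega) (by omega)
        obtain ⟨hSmem, hSge⟩ := F4 hrn2
        set S := sv.getD r.toNat 0 with hSdef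
        simp only [if_pos hrn2, hgs]
        by_cases hdS : S - p ≤ D
        · simp only [if_pos hdS]
          refine pv_min_filter_eq ms D p (S - p) S (by omega) (by omega) ?_ ?_ hSmem (pv_abs_ge hSge)
          · intro x hx hxD
            rcases lt_or_ge x p with hxp | hxp
            · have h1 := (F1 x hx hxp).2
              rw [pv_abs_lt hxp] at hxD
              omega
            · have h2 := (F2 x hx hxp).2
              rw [pv_abs_ge hxp] at hxD ⊢
              omega
          · by_cases hv0 : S - p = 0
            · rw [pv_find_eqq ms _ _ (by omega) (by rw [show p - (S - p) = S by omega]; exact hSmem)]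
              congr 1; omega
            · have hlonot : p - (S - p) ∉ ms := by
                intro hmem2
                have h1 := (F1 _ hmem2 (by omega)).2
                omega
              rw [pv_find_right ms _ _ hlonot (by rw [show p + (S - p) = S by omega]; exact hSmem)]
              congr 1; omega
        · -- nothing within range
          simp only [if_neg hdS]
          rw [show ms.filter (fun m => decide (|m - p| ≤ D)) = [] from List.filter_eq_nil_iff.mpr ?_]
          · simp [PySem.List.min?]
          · intro m hm
            simp only [decide_eq_true_eq]
            rcases lt_or_ge m p with hxp | hxp
            · have h1 := (F1 m hm hxp).2
              rw [pv_abs_lt hxp]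
              omega
            · have h2 := (F2 m hm hxp).2
              rw [pv_abs_ge hxp]
              omega
      · -- r = n and pred out of range: nothing within range
        simp only [if_neg hrn2]
        rw [show ms.filter (fun m => decide (|m - p| ≤ D)) = [] from List.filter_eq_nil_iff.mpr ?_]
        · simp [PySem.List.min?]
        · intro m hm
          simp only [decide_eq_true_eq]
          rcases lt_or_ge m p with hxp | hxp
          · have h1 := (F1 m hm hxp).2
            rw [pv_abs_lt hxp]
            omega
          · have h2 := (F2 m hm hxp).1
            omega
  · -- r = 0: no predecessor
    simp only [if_neg hr]
    by_cases hrn2 : r < (sv.length : Int)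
    · have hgs : PySem.List.pyGet? sv r = some (sv.getD r.toNat 0) :=
        pv_pyGet_nonneg sv r (by omega) (by omega)
      obtain ⟨hSmem, hSge⟩ := F4 hrn2
      set S := sv.getD r.toNat 0 with hSdef
      simp only [if_pos hrn2, hgs]
      by_cases hdS : S - p ≤ D
      · simp only [if_pos hdS]
        refine pv_min_filter_eq ms D p (S - p) S (by omega) (by omega) ?_ ?_ hSmem (pv_abs_ge hSge)
        · intro x hx hxD
          rcases lt_or_ge x p with hxp | hxp
          · have h1 := (F1 x hx hxp).1
            omega
          · have h2 := (F2 x hx hxp).2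
            rw [pv_abs_ge hxp] at hxD ⊢
            omega
        · by_cases hv0 : S - p = 0
          · rw [pv_find_eqq ms _ _ (by omega) (by rw [show p - (S - p) = S by omega]; exact hSmem)]
            congr 1; omega
          · have hlonot : p - (S - p) ∉ ms := by
              intro hmem2
              have h1 := (F1 _ hmem2 (by omega)).1
              omega
            rw [pv_find_right ms _ _ hlonot (by rw [show p + (S - p) = S by omega]; exact hSmem)]
            congr 1; omega
      · simp only [if_neg hdS]
        rw [show ms.filter (fun m => decide (|m - p| ≤ D)) = [] from List.filter_eq_nil_iff.mpr ?_]
        · simp [PySem.List.min?]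
        · intro m hm
          simp only [decide_eq_true_eq]
          rcases lt_or_ge m p with hxp | hxp
          · have h1 := (F1 m hm hxp).1
            omega
          · have h2 := (F2 m hm hxp).2
            rw [pv_abs_ge hxp]
            omega
    · -- empty list: r = 0 = n
      simp only [if_neg hrn2]
      rw [show ms.filter (fun m => decide (|m - p| ≤ D)) = [] from List.filter_eq_nil_iff.mpr ?_]
      · simp [PySem.List.min?]
      · intro m hm
        simp only [decide_eq_true_eq]
        rcases lt_or_ge m p with hxp | hxp
        · have h1 := (F1 m hm hxp).1
          omega
        · have h2 := (F2 m hm hxp).1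
          omega

-- ===== VERDICT (by name: the statement is the Claim_ definition above) =====
theorem map_extrema_py_spec : Claim_equal_map_extrema_py := by
  intro ps ms D _
  unfold Spec_map_extrema_py map_extrema_py map_extrema_py_alt
  congr 1
  apply List.foldl_ext
  intro mp p _
  have h := pv_central ms D p
  simp only [h]
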